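-- pv_equiv track=rewrite | github.com/cozy-hn/noj.am | 27436.py | find_n
-- ===== SOURCE A (Python) =====
-- def find_n(x):
--     left = 0
--     right = 10**10
--     while left < right:
--         mid = (left + right) // 2
--         if (3*mid**2)+(3*mid)+1 < x <= (3*(mid+1)**2)+(3*(mid+1))+1:
--             return mid
--         elif (3*mid**2)+(3*mid)+1 >= x:
--             right = mid
--         else:
--             left = mid + 1
--     return -1
-- ===== SOURCE B (Python) =====
-- UPPER = 10 ** 10
--
--
-- def _isqrt(n):
--     # hand-written integer square root (Newton's method); n >= 0
--     if n <= 1: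
--         return n
--     g = n // 2
--     while True:
--         nxt = (g + n // g) // 2
--         if nxt < g:
--             g = nxt
--         else:
--             return g
--
--
-- def find_n(x):
--     # closed-form inversion of f(m) = 3m^2 + 3m + 1:
--     # the answer is the largest n with f(n) < x, i.e. floor((sqrt(12x-15)-3)/6).
--     if x <= 1 or x > 3 * UPPER * UPPER + 3 * UPPER + 1:
--         return -1
--     return (_isqrt(12 * x - 15) - 3) // 6
-- ===== Notes on version B (the rewrite author's own statement) =====
-- stated objective: alternative
-- what changed: Replaced the binary search over the fixed range by a direct closed-form inversion of the quadratic bound via a hand-written Newton integer square root, keeping the same out-of-range -1 answers.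
import Mathlib
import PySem

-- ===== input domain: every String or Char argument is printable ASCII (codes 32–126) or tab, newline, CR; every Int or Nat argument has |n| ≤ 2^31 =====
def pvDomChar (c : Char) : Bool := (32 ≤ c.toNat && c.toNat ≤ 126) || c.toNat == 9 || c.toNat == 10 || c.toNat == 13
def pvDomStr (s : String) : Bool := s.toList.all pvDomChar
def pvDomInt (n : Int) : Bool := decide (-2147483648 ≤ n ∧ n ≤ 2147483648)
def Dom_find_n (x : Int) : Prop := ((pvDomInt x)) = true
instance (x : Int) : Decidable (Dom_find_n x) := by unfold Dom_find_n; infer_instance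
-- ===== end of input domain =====

-- B replaces A's binary search over the fixed range by a direct closed-form inversion of
-- f(m) = 3m^2 + 3m + 1 via a hand-written Newton integer square root (objective: alternative).

-- ===== PORT A =====
-- the while-loop of A: state (left, right), terminating because right - left shrinks
def find_n_loop (x left right : Int) : Int :=
  if h : left < right then
    let mid := PySem.Int.floordiv (left + right) 2
    if 3*mid^2 + 3*mid + 1 < x ∧ x ≤ 3*(mid+1)^2 + 3*(mid+1) + 1 then mid
    else if 3*mid^2 + 3*mid + 1 ≥ x then find_n_loop x left mid
    else find_n_loop x (mid + 1) right
  else -1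
termination_by (right - left).toNat
decreasing_by
  · have hb := PySem.Int.floordiv_two_mid_bounds (le_of_lt h)
    have hlt : PySem.Int.floordiv (left + right) 2 < right :=
      (PySem.Int.floordiv_lt_iff_lt_mul (by norm_num)).mpr (by omega)
    omega
  · have hb := PySem.Int.floordiv_two_mid_bounds (le_of_lt h)
    have hlt : PySem.Int.floordiv (left + right) 2 < right :=
      (PySem.Int.floordiv_lt_iff_lt_mul (by norm_num)).mpr (by omega)
    omega

def find_n (x : Int) : Int := find_n_loop x 0 (10^10)

-- ===== PORT B =====
-- Newton's-method integer square root, as in Source B.  All values are nonnegative, so the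
-- Python int arithmetic is mirrored exactly on Nat; the loop body
-- 'nxt = (g + n // g) // 2; if nxt < g: g = nxt else: return g' is literally Nat.sqrt.iter.
def pyIsqrt (n : Int) : Int :=
  if n ≤ 1 then n
  else Int.ofNat (Nat.sqrt.iter n.toNat (n.toNat / 2))

def find_n_alt (x : Int) : Int :=
  if x ≤ 1 ∨ 3 * 10^10 * 10^10 + 3 * 10^10 + 1 < x then -1
  else PySem.Int.floordiv (pyIsqrt (12 * x - 15) - 3) 6

-- ===== PRECONDITION & SPEC =====
def Spec_find_n (x : Int) (out : Int) : Prop := out = find_n_alt x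
instance (x : Int) (out : Int) : Decidable (Spec_find_n x out) := by unfold Spec_find_n; infer_instance

-- ===== CLAIM (what is proved, stated in full; the proofs are below) =====
def Claim_equal_find_n : Prop := ∀ (x : Int), Dom_find_n x → Spec_find_n x (find_n x)

-- ===== LEMMAS AND PROOFS =====

-- f is strictly monotone on nonnegative arguments
lemma f_strict_mono (a b : Int) (ha : 0 ≤ a) (h : a < b) :
    3*a^2 + 3*a + 1 < 3*b^2 + 3*b + 1 := by nlinarith

lemma f_lt_f_imp (a b : Int) (ha : 0 ≤ a) (hb : 0 ≤ b)
    (h : 3*a^2 + 3*a + 1 < 3*b^2 + 3*b + 1) : a < b := by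
  by_contra hc
  push_neg at hc
  rcases lt_or_eq_of_le hc with h' | h'
  · exact absurd (f_strict_mono b a hb h') (lt_asymm h)
  · subst h'
    exact absurd h (lt_irrefl _)

-- the Newton loop computes the integer square root
lemma pyIsqrt_spec (n : Int) (h : 2 ≤ n) :
    0 ≤ pyIsqrt n ∧ pyIsqrt n * pyIsqrt n ≤ n ∧ n < (pyIsqrt n + 1) * (pyIsqrt n + 1) := by
  unfold pyIsqrt
  rw [if_neg (by omega)]
  set m := n.toNat with hm
  have hmn : (m : Int) = n := Int.toNat_of_nonneg (by omega)
  have hm2 : 2 ≤ m := by omega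
  have hguess : m < (m / 2 + 1) * (m / 2 + 1) := by
    have h1 : 1 ≤ m / 2 := by omega
    have h2 : m ≤ 2 * (m / 2) + 1 := by omega
    nlinarith
  have h1 := Nat.sqrt.iter_sq_le m (m / 2)
  have h2 := Nat.sqrt.lt_iter_succ_sq m (m / 2) hguess
  set q := Nat.sqrt.iter m (m / 2) with hq
  have e : Int.ofNat q = (q : Int) := rfl
  rw [e]
  refine ⟨by exact_mod_cast Nat.zero_le q, ?_, ?_⟩
  · rw [← hmn]; exact_mod_cast h1
  · rw [← hmn]; exact_mod_cast h2

-- B's value satisfies the defining inequalities of A's search target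
lemma alt_spec (x : Int) (h1 : 2 ≤ x) (h2 : x ≤ 2147483648) :
    0 ≤ find_n_alt x ∧ find_n_alt x < 10^10 ∧
    3*(find_n_alt x)^2 + 3*(find_n_alt x) + 1 < x ∧
    x ≤ 3*(find_n_alt x + 1)^2 + 3*(find_n_alt x + 1) + 1 := by
  unfold find_n_alt
  rw [if_neg (by push_neg; constructor <;> omega)]
  obtain ⟨hs0, hsl, hsu⟩ := pyIsqrt_spec (12 * x - 15) (by omega)
  set s := pyIsqrt (12 * x - 15) with hsdef
  set c := PySem.Int.floordiv (s - 3) 6 with hcdef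
  have hfd := (PySem.Int.floordiv_eq_iff_of_pos (a := s - 3) (b := 6) (q := c)
    (by norm_num)).mp rfl
  have hs3 : 3 ≤ s := by nlinarith
  have hc0 : 0 ≤ c := by omega
  have hlow : 6*c + 3 ≤ s := by omega
  have hup : s + 1 ≤ 6*c + 9 := by omega
  have hfc : 3*c^2 + 3*c + 1 < x := by nlinarith
  have hfc1 : x ≤ 3*(c+1)^2 + 3*(c+1) + 1 := by
    obtain ⟨F, hF⟩ : ∃ F : Int, F = 3*(c+1)^2 + 3*(c+1) + 1 := ⟨_, rfl⟩
    have h12 : 12 * x ≤ 12 * F + 11 := by rw [hF]; nlinarith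
    omega
  refine ⟨hc0, ?_, hfc, hfc1⟩
  nlinarith

-- A's loop returns -1 whenever x ≤ 1 (the searched interval keeps nonnegative left end)
lemma loop_neg (x : Int) (hx : x ≤ 1) :
    ∀ k l r : Int, 0 ≤ l → (r - l).toNat ≤ k.toNat → find_n_loop x l r = -1 := by
  intro k
  induction k.toNat generalizing k with
  | zero =>
    intro l r hl hk
    rw [find_n_loop]
    rw [dif_neg (by omega)]
  | succ k' ih =>
    intro l r hl hk
    rw [find_n_loop]
    by_cases hlr : l < r
    · rw [dif_pos hlr]
      have hb := PySem.Int.floordiv_two_mid_bounds (le_of_lt hlr)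
      have hlt : PySem.Int.floordiv (l + r) 2 < r :=
        (PySem.Int.floordiv_lt_iff_lt_mul (by norm_num)).mpr (by omega)
      set mid := PySem.Int.floordiv (l + r) 2 with hmid
      have hfm : 1 ≤ 3*mid^2 + 3*mid + 1 := by nlinarith
      rw [if_neg (by omega)]
      rw [if_pos (by omega)]
      exact ih (k := (k' : Int)) l mid hl (by omega)
    · rw [dif_neg hlr]

-- A's loop finds n whenever the target lies in the open search window
lemma loop_finds (x n : Int) (hn0 : 0 ≤ n)
    (hlo : 3*n^2 + 3*n + 1 < x) (hhi : x ≤ 3*(n+1)^2 + 3*(n+1) + 1) :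
    ∀ k l r : Int, 0 ≤ l → l ≤ n → n < r → (r - l).toNat ≤ k.toNat →
      find_n_loop x l r = n := by
  intro k
  induction k.toNat generalizing k with
  | zero => intro l r h0 h1 h2 hk; omega
  | succ k' ih =>
    intro l r h0 h1 h2 hk
    have hlr : l < r := by omega
    rw [find_n_loop, dif_pos hlr]
    have hb := PySem.Int.floordiv_two_mid_bounds (le_of_lt hlr)
    have hlt : PySem.Int.floordiv (l + r) 2 < r :=
      (PySem.Int.floordiv_lt_iff_lt_mul (by norm_num)).mpr (by omega)
    set mid := PySem.Int.floordiv (l + r) 2 with hmid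
    have hm0 : 0 ≤ mid := by omega
    by_cases hc1 : 3*mid^2 + 3*mid + 1 < x ∧ x ≤ 3*(mid+1)^2 + 3*(mid+1) + 1
    · rw [if_pos hc1]
      -- uniqueness: both mid and n satisfy f ⬝ < x ≤ f (⬝+1)
      have hmn : mid < n + 1 := by
        have := f_lt_f_imp mid (n+1) hm0 (by omega) (by omega)
        omega
      have hnm : n < mid + 1 := by
        have := f_lt_f_imp n (mid+1) hn0 (by omega) (by omega)
        omega
      omega
    · rw [if_neg hc1]
      by_cases hc2 : 3*mid^2 + 3*mid + 1 ≥ x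
      · rw [if_pos hc2]
        have hnmid : n < mid := f_lt_f_imp n mid hn0 hm0 (by omega)
        exact ih (k := (k' : Int)) l mid h0 h1 hnmid (by omega)
      · rw [if_neg hc2]
        push_neg at hc1 hc2
        have hx2 : 3*(mid+1)^2 + 3*(mid+1) + 1 < x := hc1 hc2
        have : mid + 1 < n + 1 := f_lt_f_imp (mid+1) (n+1) (by omega) (by omega) (by omega)
        exact ih (k := (k' : Int)) (mid+1) r (by omega) (by omega) h2 (by omega)

-- ===== VERDICT (by name: the statement is the Claim_ definition above) =====
theorem find_n_spec : Claim_equal_find_n := by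
  intro x hdom
  have hx : -2147483648 ≤ x ∧ x ≤ 2147483648 := by
    simpa [Dom_find_n, pvDomInt] using hdom
  unfold Spec_find_n find_n
  by_cases h1 : x ≤ 1
  · rw [loop_neg x h1 (10^10) 0 (10^10) le_rfl (by norm_num)]
    unfold find_n_alt
    rw [if_pos (Or.inl h1)]
  · push_neg at h1
    obtain ⟨hc0, hcu, hfl, hfu⟩ := alt_spec x (by omega) hx.2
    exact loop_finds x (find_n_alt x) hc0 hfl hfu (10^10) 0 (10^10)
      le_rfl hc0 hcu (by norm_num)
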